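-- pv_equiv track=rewrite | github.com/AltaArts/SourceTab--Prism-Plugin | Libs/SourceTab_Utils.py | groupMetadata
-- ===== SOURCE A (Python) =====
-- def groupMetadata(metadata:dict) -> dict:
--     '''Groups Raw Metadata into Logical Groups'''
--
--     grouped = {}
--
--     for key, value in metadata.items():
--         section = key.split(":")[0]
--         tag = key.split(":")[1] if len(key.split(":")) > 1 else key
--
--         if section not in grouped:
--             grouped[section] = {}
--
--         grouped[section][tag] = value
--
--     return grouped
-- ===== SOURCE B (Python) =====
-- def groupMetadata(metadata: dict) -> dict:
--     '''Groups Raw Metadata into Logical Groups'''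
--
--     triples = []
--     for key, value in metadata.items():
--         parts = key.split(":")
--         triples.append((parts[0], parts[1] if len(parts) > 1 else key, value))
--
--     sections = list(dict.fromkeys(s for s, _, _ in triples))
--     return {s: {t: v for s2, t, v in triples if s2 == s} for s in sections}
-- ===== Notes on version B (the rewrite author's own statement) =====
-- stated objective: alternative
-- what changed: Replaces A's incremental membership-check-and-insert into a dict of dicts by a three-stage pipeline: precompute (section, tag, value) triples once, dedupe the section list (dict.fromkeys), then build each section's inner dict by a per-section filtering comprehension over the triples.
import Mathlib
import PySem

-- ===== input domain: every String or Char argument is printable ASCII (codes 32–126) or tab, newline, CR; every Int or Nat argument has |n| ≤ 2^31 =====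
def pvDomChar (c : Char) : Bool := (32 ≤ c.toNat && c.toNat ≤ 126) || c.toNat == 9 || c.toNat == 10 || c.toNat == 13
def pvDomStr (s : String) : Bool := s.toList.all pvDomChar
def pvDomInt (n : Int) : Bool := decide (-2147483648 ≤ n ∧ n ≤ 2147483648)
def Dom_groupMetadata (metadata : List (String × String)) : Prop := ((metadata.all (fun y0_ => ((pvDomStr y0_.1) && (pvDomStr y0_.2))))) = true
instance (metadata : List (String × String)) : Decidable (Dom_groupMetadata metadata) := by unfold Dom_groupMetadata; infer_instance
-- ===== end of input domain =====

-- B replaces A's incremental check-and-insert grouping by a precompute-triples / dedupe-sections /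
-- per-section-filter pipeline (objective: alternative decomposition, same observable result).

-- ===== PORT A =====
-- A's loop over metadata.items(), building a dict of dicts incrementally.
-- key.split(":") with a non-empty separator never raises: PySem.Str.split? returns some, .getD [] is exact;
-- the result is non-empty so parts[0] is in range, and parts[1] is guarded by len > 1, so pyGetD-style getD defaults never fire.
def groupMetadata (metadata : List (String × String)) : List (String × List (String × String)) :=
  let grouped := metadata.foldl
    (fun (g : PySem.Dict String (PySem.Dict String String)) kv =>
      let parts := (PySem.Str.split? kv.1 ":").getD []
      let sec := parts.getD 0 ""
      let tag := if parts.length > 1 then parts.getD 1 "" else kv.1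
      -- if section not in grouped: grouped[section] = {}
      let g1 := if g.contains sec then g else g.insert sec PySem.Dict.empty
      -- grouped[section][tag] = value  (after the guard, sec is present, so getD's default never fires)
      g1.insert sec ((g1.getD sec PySem.Dict.empty).insert tag kv.2))
    PySem.Dict.empty
  grouped.items.map (fun p => (p.1, p.2.items))

-- ===== PORT B =====
def groupMetadata_alt (metadata : List (String × String)) : List (String × List (String × String)) :=
  -- triples: (section, tag, value) computed once per key
  let triples := metadata.foldl
    (fun (acc : List (String × String × String)) kv =>
      let parts := (PySem.Str.split? kv.1 ":").getD []
      acc ++ [(parts.getD 0 "",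
               (if parts.length > 1 then parts.getD 1 "" else kv.1),
               kv.2)]) []
  -- sections = list(dict.fromkeys(...)) : ordered dedup
  let sections := PySem.List.dedup (triples.map (·.1))
  -- {s: {t: v for s2,t,v in triples if s2 == s} for s in sections}
  sections.map (fun s =>
    (s, ((triples.filter (fun t => t.1 == s)).foldl
          (fun (d : PySem.Dict String String) t => d.insert t.2.1 t.2.2)
          PySem.Dict.empty).items))

-- ===== PRECONDITION & SPEC =====
def Spec_groupMetadata (metadata : List (String × String)) (out : List (String × List (String × String))) : Prop := out = groupMetadata_alt metadata
instance (metadata : List (String × String)) (out : List (String × List (String × String))) : Decidable (Spec_groupMetadata metadata out) := by unfold Spec_groupMetadata; infer_instance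

-- ===== CLAIM (what is proved, stated in full; the proofs are below) =====
def Claim_equal_groupMetadata : Prop := ∀ (metadata : List (String × String)), Dom_groupMetadata metadata → Spec_groupMetadata metadata (groupMetadata metadata)

-- ===== LEMMAS AND PROOFS =====

-- (sec, tag, value) triple of one metadata item, shared by both programs' key-splitting code
def pvTrip (kv : String × String) : String × String × String :=
  let parts := (PySem.Str.split? kv.1 ":").getD []
  (parts.getD 0 "", (if parts.length > 1 then parts.getD 1 "" else kv.1), kv.2)

-- the collapsed step of A's loop
def pvStep (g : PySem.Dict String (PySem.Dict String String)) (x : String × String × String) :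
    PySem.Dict String (PySem.Dict String String) :=
  g.insert x.1 ((g.getD x.1 PySem.Dict.empty).insert x.2.1 x.2.2)

-- B's inner dict for section s
def pvInner (s : String) (l : List (String × String × String)) : PySem.Dict String String :=
  (l.filter (fun t => t.1 == s)).foldl (fun d t => d.insert t.2.1 t.2.2) PySem.Dict.empty

-- A's guarded branch collapses to pvStep
lemma pvStepA_eq (g : PySem.Dict String (PySem.Dict String String)) (x : String × String × String) :
    (let g1 := if g.contains x.1 then g else g.insert x.1 PySem.Dict.empty
     g1.insert x.1 ((g1.getD x.1 PySem.Dict.empty).insert x.2.1 x.2.2)) = pvStep g x := by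
  by_cases h : g.contains x.1 = true
  · simp [pvStep, h]
  · have hf : g.contains x.1 = false := by simpa using h
    simp [pvStep, hf, PySem.Dict.getD_insert_self, PySem.Dict.insert_insert_self,
      PySem.Dict.getD_of_not_contains _ _ hf]

lemma pvInner_append (s' : String) (l : List (String × String × String)) (x : String × String × String) :
    pvInner s' (l ++ [x]) = if x.1 == s' then (pvInner s' l).insert x.2.1 x.2.2 else pvInner s' l := by
  simp only [pvInner, List.filter_append, List.foldl_append]
  by_cases h : x.1 == s'
  · simp [h]
  · simp [h]

-- the loop invariant: A's dict's items are B's dedup-and-filter table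
lemma pvG_items (l : List (String × String × String)) :
    (l.foldl pvStep PySem.Dict.empty).items
      = (PySem.Set.ofList (l.map (·.1))).map (fun s => (s, pvInner s l)) := by
  induction l using List.reverseRecOn with
  | nil => rfl
  | append_singleton l x ih =>
    have hkeys : (l.foldl pvStep PySem.Dict.empty).keys = PySem.Set.ofList (l.map (·.1)) := by
      simp only [PySem.Dict.keys, ih, List.map_map]
      exact List.map_id' _
    have hnodup : (l.foldl pvStep PySem.Dict.empty).keys.Nodup := by
      rw [hkeys]; exact PySem.Set.nodup_ofList _
    rw [List.foldl_append, List.foldl_cons, List.foldl_nil]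
    simp only [List.map_append, List.map_cons, List.map_nil, PySem.Set.ofList_append_singleton]
    by_cases hs : x.1 ∈ l.map (·.1)
    · -- section already present: insert overwrites in place
      have hc : (l.foldl pvStep PySem.Dict.empty).contains x.1 = true := by
        rw [PySem.Dict.contains_iff_mem_keys, hkeys, PySem.Set.mem_ofList]; exact hs
      have hmem : (x.1, pvInner x.1 l) ∈ (l.foldl pvStep PySem.Dict.empty).items := by
        rw [ih]
        exact List.mem_map_of_mem ((PySem.Set.mem_ofList _ _).mpr hs)
      have hgetD : (l.foldl pvStep PySem.Dict.empty).getD x.1 PySem.Dict.empty = pvInner x.1 l :=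
        PySem.Dict.getD_of_mem_items _ hmem hnodup _
      rw [PySem.Set.add_of_mem ((PySem.Set.mem_ofList _ _).mpr hs)]
      rw [pvStep, PySem.Dict.items_insert_of_contains _ _ hc, hgetD, ih, List.map_map]
      apply List.map_congr_left
      intro s' hs'
      simp only [Function.comp_apply]
      rw [pvInner_append]
      by_cases he : s' = x.1
      · subst he; simp
      · have h1 : (s' == x.1) = false := by simpa using he
        have h2 : (x.1 == s') = false := by simpa using (Ne.symm he)
        simp [h1, h2]
    · -- fresh section: appended at the end
      have hc : (l.foldl pvStep PySem.Dict.empty).contains x.1 = false := by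
        have : ¬ (l.foldl pvStep PySem.Dict.empty).contains x.1 = true := by
          rw [PySem.Dict.contains_iff_mem_keys, hkeys, PySem.Set.mem_ofList]; exact hs
        simpa using this
      have hinner_nil : pvInner x.1 l = PySem.Dict.empty := by
        unfold pvInner
        have : l.filter (fun t => t.1 == x.1) = [] := by
          rw [List.filter_eq_nil_iff]
          intro a ha hb
          exact hs (by
            have : a.1 = x.1 := by simpa using hb
            exact this ▸ List.mem_map_of_mem ha)
        rw [this]; rfl
      rw [PySem.Set.add_of_not_mem (fun h => hs ((PySem.Set.mem_ofList _ _).mp h))]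
      rw [pvStep, PySem.Dict.items_insert_of_not_contains _ _ hc,
        PySem.Dict.getD_of_not_contains _ _ hc, ih, List.map_append]
      congr 1
      · apply List.map_congr_left
        intro s' hs'
        rw [pvInner_append]
        have hne : (x.1 == s') = false := by
          have : s' ∈ l.map (·.1) := (PySem.Set.mem_ofList _ _).mp hs'
          have : x.1 ≠ s' := fun he => hs (he ▸ this)
          simpa using this
        simp [hne]
      · simp [pvInner_append, hinner_nil]

-- ===== VERDICT (by name: the statement is the Claim_ definition above) =====
theorem groupMetadata_spec : Claim_equal_groupMetadata := by
  intro metadata _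
  show groupMetadata metadata = groupMetadata_alt metadata
  have hA : groupMetadata metadata
      = (((metadata.map pvTrip).foldl pvStep PySem.Dict.empty).items).map (fun p => (p.1, p.2.items)) := by
    unfold groupMetadata
    rw [List.foldl_map]
    have hf := PySem.List.foldl_congr_mem metadata
      (fun (g : PySem.Dict String (PySem.Dict String String)) kv =>
        let parts := (PySem.Str.split? kv.1 ":").getD []
        let sec := parts.getD 0 ""
        let tag := if parts.length > 1 then parts.getD 1 "" else kv.1
        let g1 := if g.contains sec then g else g.insert sec PySem.Dict.empty
        g1.insert sec ((g1.getD sec PySem.Dict.empty).insert tag kv.2))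
      (fun g kv => pvStep g (pvTrip kv))
      PySem.Dict.empty
      (fun g kv _ => pvStepA_eq g (pvTrip kv))
    rw [hf]
  have hB : groupMetadata_alt metadata
      = (PySem.List.dedup ((metadata.map pvTrip).map (·.1))).map
          (fun s => (s, (pvInner s (metadata.map pvTrip)).items)) := by
    unfold groupMetadata_alt
    have ht : metadata.foldl
        (fun (acc : List (String × String × String)) kv =>
          let parts := (PySem.Str.split? kv.1 ":").getD []
          acc ++ [(parts.getD 0 "",
                   (if parts.length > 1 then parts.getD 1 "" else kv.1),
                   kv.2)]) []
        = metadata.map pvTrip := by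
      have := PySem.List.foldl_append_singleton_eq_map pvTrip metadata []
      simpa using this
    rw [ht]
    rfl
  rw [hA, hB, pvG_items, List.map_map]
  rfl
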